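-- pv_equiv track=rewrite | github.com/JorganPubshire/FootballDarts | src/dart_football/display/dart_help.py | _kickoff_field_outcome_prefix
-- ===== SOURCE A (Python) =====
-- def _kickoff_field_outcome_prefix(segments: frozenset[int]) -> str:
--     """Lead-in for standard kickoff field bands (segments 1–5 vs 6–8)."""
--     if not segments:
--         return ""
--     if all(1 <= s <= 5 for s in segments):
--         return "Ball kicked out of bounds. "
--     if all(6 <= s <= 8 for s in segments):
--         return "Kicked short of landing zone. "
--     return ""
-- ===== SOURCE B (Python) =====
-- def _kickoff_field_outcome_prefix(segments: frozenset[int]) -> str: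
--     """Lead-in for standard kickoff field bands (segments 1-5 vs 6-8)."""
--     band = None
--     for s in segments:
--         b = 1 if 1 <= s <= 5 else 2 if 6 <= s <= 8 else 0
--         if band is None:
--             band = b
--         elif band != b:
--             band = 0
--     if band == 1:
--         return "Ball kicked out of bounds. "
--     if band == 2:
--         return "Kicked short of landing zone. "
--     return ""
-- ===== Notes on version B (the rewrite author's own statement) =====
-- stated objective: alternative
-- what changed: Replaces A's two separate short-circuiting all(...) band scans (plus an empty guard) with a single pass that classifies each element into a band code (1, 2 or 0) and collapses disagreeing codes to 0, mapping the final code to the string.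
import Mathlib
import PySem

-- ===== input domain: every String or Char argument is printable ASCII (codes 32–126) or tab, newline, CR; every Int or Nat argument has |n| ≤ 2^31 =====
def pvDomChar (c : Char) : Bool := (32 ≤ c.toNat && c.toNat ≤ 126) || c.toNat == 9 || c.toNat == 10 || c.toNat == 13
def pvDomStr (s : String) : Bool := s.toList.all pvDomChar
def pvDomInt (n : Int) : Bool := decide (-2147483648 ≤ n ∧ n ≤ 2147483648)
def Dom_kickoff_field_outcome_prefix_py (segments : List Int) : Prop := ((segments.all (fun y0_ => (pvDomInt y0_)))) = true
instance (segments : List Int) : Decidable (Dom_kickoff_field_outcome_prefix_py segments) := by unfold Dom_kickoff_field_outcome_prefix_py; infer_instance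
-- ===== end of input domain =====

-- B replaces A's two all(...) band scans with one single-pass fold classifying each element into a band code and collapsing disagreements (alternative decomposition, same cost).


-- ===== PORT A =====
def kickoff_field_outcome_prefix_py (segments : List Int) : String :=
  if segments = [] then ""
  else if segments.all (fun s => decide (1 ≤ s) && decide (s ≤ 5)) then "Ball kicked out of bounds. "
  else if segments.all (fun s => decide (6 ≤ s) && decide (s ≤ 8)) then "Kicked short of landing zone. "
  else ""

-- ===== PORT B =====
-- band code of one element: 1 for [1,5], 2 for [6,8], 0 otherwise
def pvBand (s : Int) : Int :=
  if 1 ≤ s ∧ s ≤ 5 then 1 else if 6 ≤ s ∧ s ≤ 8 then 2 else 0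

-- one loop iteration: first element sets the code, later mismatches collapse it to 0
def pvStep (acc : Option Int) (s : Int) : Option Int :=
  let b := pvBand s
  match acc with
  | none => some b
  | some bb => if bb ≠ b then some 0 else some bb

def kickoff_field_outcome_prefix_py_alt (segments : List Int) : String :=
  let band := segments.foldl pvStep (none : Option Int)
  if band = some 1 then "Ball kicked out of bounds. "
  else if band = some 2 then "Kicked short of landing zone. "
  else ""

-- ===== PRECONDITION & SPEC =====
def Spec_kickoff_field_outcome_prefix_py (segments : List Int) (out : String) : Prop := out = kickoff_field_outcome_prefix_py_alt segments
instance (segments : List Int) (out : String) : Decidable (Spec_kickoff_field_outcome_prefix_py segments out) := by unfold Spec_kickoff_field_outcome_prefix_py; infer_instance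

-- ===== CLAIM (what is proved, stated in full; the proofs are below) =====
def Claim_equal_kickoff_field_outcome_prefix_py : Prop := ∀ (segments : List Int), Dom_kickoff_field_outcome_prefix_py segments → Spec_kickoff_field_outcome_prefix_py segments (kickoff_field_outcome_prefix_py segments)

-- ===== LEMMAS AND PROOFS =====

theorem pv_fold_some (xs : List Int) (b : Int) :
    xs.foldl pvStep (some b)
    = some (if xs.all (fun s => pvBand s == b) then b else 0) := by
  induction xs generalizing b with
  | nil => simp
  | cons s xs ih =>
    have hstep : pvStep (some b) s = if b ≠ pvBand s then some 0 else some b := rfl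
    rw [List.foldl_cons, hstep, List.all_cons]
    by_cases h : b = pvBand s
    · rw [if_neg (by simp [h]), ih]
      have : (pvBand s == b) = true := by simp [h]
      simp [this]
    · rw [if_pos h, ih]
      have h0 : (pvBand s == b) = false := by
        simp only [beq_eq_false_iff_ne, ne_eq]
        exact fun hc => h hc.symm
      simp [h0]

theorem pv_band_one (s : Int) : (pvBand s == 1) = (decide (1 ≤ s) && decide (s ≤ 5)) := by
  unfold pvBand; split_ifs with h1 h2 <;> simp_all <;> omega

theorem pv_band_two (s : Int) : (pvBand s == 2) = (decide (6 ≤ s) && decide (s ≤ 8)) := by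
  unfold pvBand; split_ifs with h1 h2 <;> simp_all <;> omega

-- ===== VERDICT (by name: the statement is the Claim_ definition above) =====
theorem kickoff_field_outcome_prefix_py_spec : Claim_equal_kickoff_field_outcome_prefix_py := by
  intro segments _
  unfold Spec_kickoff_field_outcome_prefix_py kickoff_field_outcome_prefix_py kickoff_field_outcome_prefix_py_alt
  match segments with
  | [] => rfl
  | x :: xs =>
    simp only [List.cons_ne_nil, if_false, List.foldl_cons]
    have hstep0 : pvStep none x = some (pvBand x) := rfl
    simp only [hstep0, pv_fold_some]
    by_cases h1 : xs.all (fun s => pvBand s == pvBand x) = true ∧ pvBand x = 1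
    · have hall : (x :: xs).all (fun s => decide (1 ≤ s) && decide (s ≤ 5)) = true := by
        simp only [List.all_cons, ← pv_band_one, h1.2, Bool.and_eq_true, beq_self_eq_true,
          true_and]
        refine List.all_eq_true.mpr ?_
        intro a ha
        have := List.all_eq_true.mp h1.1 a ha
        simpa [h1.2] using this
      rw [if_pos hall]
      rw [if_pos h1.1, h1.2]
      rfl
    · by_cases h2 : xs.all (fun s => pvBand s == pvBand x) = true ∧ pvBand x = 2
      · have hall2 : (x :: xs).all (fun s => decide (6 ≤ s) && decide (s ≤ 8)) = true := by
          simp only [List.all_cons, ← pv_band_two, h2.2, Bool.and_eq_true, beq_self_eq_true,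
            true_and]
          refine List.all_eq_true.mpr ?_
          intro a ha
          have := List.all_eq_true.mp h2.1 a ha
          simpa [h2.2] using this
        have hnot1 : ¬ (x :: xs).all (fun s => decide (1 ≤ s) && decide (s ≤ 5)) = true := by
          intro hc
          have hx := (List.all_eq_true.mp hc x (List.mem_cons_self))
          rw [← pv_band_one] at hx
          have : pvBand x = 1 := by simpa [beq_iff_eq] using hx
          rw [this] at h2; exact absurd h2.2 (by norm_num)
        rw [if_neg hnot1, if_pos hall2, if_pos h2.1, h2.2]
        rfl
      · -- neither band: A returns "", B's code is not 1 and not 2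
        have hnot1 : ¬ (x :: xs).all (fun s => decide (1 ≤ s) && decide (s ≤ 5)) = true := by
          intro hc
        -- derive band x = 1 and all agree
          have hx := List.all_eq_true.mp hc x (List.mem_cons_self)
          rw [← pv_band_one] at hx
          have hbx : pvBand x = 1 := by simpa [beq_iff_eq] using hx
          refine h1 ⟨List.all_eq_true.mpr ?_, hbx⟩
          intro a ha
          have := List.all_eq_true.mp hc a (List.mem_cons_of_mem _ ha)
          rw [← pv_band_one] at this
          have : pvBand a = 1 := by simpa [beq_iff_eq] using this
          simp [this, hbx]
        have hnot2 : ¬ (x :: xs).all (fun s => decide (6 ≤ s) && decide (s ≤ 8)) = true := by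
          intro hc
          have hx := List.all_eq_true.mp hc x (List.mem_cons_self)
          rw [← pv_band_two] at hx
          have hbx : pvBand x = 2 := by simpa [beq_iff_eq] using hx
          refine h2 ⟨List.all_eq_true.mpr ?_, hbx⟩
          intro a ha
          have := List.all_eq_true.mp hc a (List.mem_cons_of_mem _ ha)
          rw [← pv_band_two] at this
          have : pvBand a = 2 := by simpa [beq_iff_eq] using this
          simp [this, hbx]
        rw [if_neg hnot1, if_neg hnot2]
        by_cases hagree : xs.all (fun s => pvBand s == pvBand x) = true
        · rw [if_pos hagree]
          have hb1 : pvBand x ≠ 1 := fun h => h1 ⟨hagree, h⟩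
          have hb2 : pvBand x ≠ 2 := fun h => h2 ⟨hagree, h⟩
          simp [hb1, hb2]
        · rw [if_neg hagree]
          norm_num
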